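-- pv_equiv track=rewrite | github.com/teratensor/Prediction | 5_combination/generate_combinations.py | get_recent_stats
-- ===== SOURCE A (Python) =====
-- from collections import Counter, defaultdict
--
-- def get_recent_stats(data, n=50):
--     """최근 N회차 통계"""
--     recent = data[-n:]
--
--     # 각 포지션별 빈도
--     pos_freq = {pos: Counter() for pos in range(6)}
--     for r in recent:
--         for pos, ball in enumerate(r['balls']):
--             pos_freq[pos][ball] += 1
--
--     # 전체 번호 빈도
--     all_freq = Counter()
--     for r in recent:
--         for ball in r['balls']:
--             all_freq[ball] += 1
--
--     return pos_freq, all_freq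
-- ===== SOURCE B (Python) =====
-- from collections import Counter
--
-- def get_recent_stats(data, n=50):
--     """최근 N회차 통계 — one raw pass builds a flat (position, ball) Counter;
--     both result tables are then derived from it without touching the data again."""
--     recent = data[-n:]
--     pair_freq = Counter((pos, ball)
--                         for r in recent for pos, ball in enumerate(r['balls']))
--     pos_freq = {pos: Counter() for pos in range(6)}
--     all_freq = Counter()
--     for (pos, ball), cnt in pair_freq.items():
--         pos_freq[pos][ball] = cnt
--         all_freq[ball] += cnt
--     return pos_freq, all_freq
-- ===== Notes on version B (the rewrite author's own statement) =====
-- stated objective: alternative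
-- what changed: B makes a single raw-data pass that builds one flat Counter keyed by (position, ball) pairs, then derives both result tables (the per-position dict of Counters and the overall Counter) from that pair Counter's items, whereas A makes two raw-data passes with per-position update loops.
import Mathlib
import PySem

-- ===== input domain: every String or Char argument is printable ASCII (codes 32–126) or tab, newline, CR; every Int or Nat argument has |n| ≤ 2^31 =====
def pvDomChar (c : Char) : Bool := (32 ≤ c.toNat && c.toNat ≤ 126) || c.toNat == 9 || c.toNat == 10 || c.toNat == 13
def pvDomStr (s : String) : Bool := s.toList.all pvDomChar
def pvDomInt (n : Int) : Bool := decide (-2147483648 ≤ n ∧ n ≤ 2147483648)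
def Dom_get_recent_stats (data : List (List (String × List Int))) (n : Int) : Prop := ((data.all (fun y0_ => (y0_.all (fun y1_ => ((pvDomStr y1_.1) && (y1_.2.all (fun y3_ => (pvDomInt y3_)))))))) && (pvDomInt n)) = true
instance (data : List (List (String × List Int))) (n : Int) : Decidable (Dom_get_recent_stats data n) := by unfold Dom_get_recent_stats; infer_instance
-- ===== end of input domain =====

-- B scans the raw data once into a flat Counter keyed by (position, ball) pairs and derives both
-- result tables from that Counter's items, instead of A's two raw-data passes; objective: alternative.

-- ===== PORT A =====
-- 'r["balls"]' and 'pos_freq[pos]' raise KeyError when the key is absent; under Pre_ both keys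
-- are always present, so Dict.getD / Dict.modify are exact there.
def get_recent_stats (data : List (List (String × List Int))) (n : Int) :
    (List (Int × List (Int × Int))) × (List (Int × Int)) :=
  let recent := PySem.List.slice data (some (-n)) none
  let posFreq0 : PySem.Dict Int (PySem.Dict Int Int) :=
    PySem.Dict.ofList ((PySem.List.pyRange 0 6 1).map (fun pos => (pos, PySem.Dict.empty)))
  let posFreq := recent.foldl
    (fun pf r => (PySem.List.enumerate ((PySem.Dict.mk r).getD "balls" []) 0).foldl
        (fun pf pb => pf.modify pb.1 PySem.Dict.empty (fun c => c.modify pb.2 0 (· + 1))) pf)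
    posFreq0
  let allFreq := recent.foldl
    (fun af r => ((PySem.Dict.mk r).getD "balls" []).foldl
        (fun af ball => af.modify ball 0 (· + 1)) af)
    (PySem.Dict.empty : PySem.Dict Int Int)
  (posFreq.items.map (fun p => (p.1, p.2.items)), allFreq.items)

-- ===== PORT B =====
-- 'r["balls"]' is present under Pre_ (getD exact); 'pos_freq[pos][ball] = cnt' hits a key pos
-- that is present under Pre_ (0 ≤ pos < 6), so Dict.modify is exact there.
def get_recent_stats_alt (data : List (List (String × List Int))) (n : Int) :
    (List (Int × List (Int × Int))) × (List (Int × Int)) :=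
  let recent := PySem.List.slice data (some (-n)) none
  let pairFreq : PySem.Dict (Int × Int) Int :=
    PySem.Dict.counter (recent.flatMap (fun r =>
      PySem.List.enumerate ((PySem.Dict.mk r).getD "balls" []) 0))
  let posFreq0 : PySem.Dict Int (PySem.Dict Int Int) :=
    PySem.Dict.ofList ((PySem.List.pyRange 0 6 1).map (fun pos => (pos, PySem.Dict.empty)))
  let st := pairFreq.items.foldl
    (fun st pb =>
      (st.1.modify pb.1.1 PySem.Dict.empty (fun c => c.insert pb.1.2 pb.2),
       st.2.modify pb.1.2 0 (· + pb.2)))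
    (posFreq0, (PySem.Dict.empty : PySem.Dict Int Int))
  (st.1.items.map (fun p => (p.1, p.2.items)), st.2.items)

-- ===== PRECONDITION & SPEC =====
-- Pre_ is exactly A's return domain: Python A raises KeyError when a recent draw lacks the
-- 'balls' key or has more than 6 balls (position 6 is missing from pos_freq).
def Pre_get_recent_stats (data : List (List (String × List Int))) (n : Int) : Prop :=
  ∀ r ∈ PySem.List.slice data (some (-n)) none,
    (PySem.Dict.mk r).contains "balls" = true ∧
      ((PySem.Dict.mk r).getD "balls" []).length ≤ 6
instance (data : List (List (String × List Int))) (n : Int) : Decidable (Pre_get_recent_stats data n) := by unfold Pre_get_recent_stats; infer_instance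
def pvWitness_get_recent_stats : (List (List (String × List Int))) × Int :=
  ([[("balls", [1, 2, 3, 4, 5, 6])], [("balls", [7, 2, 9])]], 50)
def Spec_get_recent_stats (data : List (List (String × List Int))) (n : Int) (out : (List (Int × List (Int × Int))) × (List (Int × Int))) : Prop := out = get_recent_stats_alt data n
instance (data : List (List (String × List Int))) (n : Int) (out : (List (Int × List (Int × Int))) × (List (Int × Int))) : Decidable (Spec_get_recent_stats data n out) := by unfold Spec_get_recent_stats; infer_instance

-- ===== CLAIM (what is proved, stated in full; the proofs are below) =====
def Claim_equal_get_recent_stats : Prop := ∀ (data : List (List (String × List Int))) (n : Int), Dom_get_recent_stats data n → Pre_get_recent_stats data n → Spec_get_recent_stats data n (get_recent_stats data n)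

-- ===== LEMMAS AND PROOFS =====

-- a nested loop over rows is one loop over the flattened stream
theorem pv_foldl_flatMap {α β γ : Type} (l : List α) (f : α → List β) (g : γ → β → γ) (i : γ) :
    (l.flatMap f).foldl g i = l.foldl (fun a x => (f x).foldl g a) i := by
  induction l generalizing i with
  | nil => rfl
  | cons x xs ih => simp [List.flatMap_cons, List.foldl_append, ih]

-- the p-slot of a keyed modify loop is the loop over the elements keyed p
theorem pv_getD_foldl_modify_key {α ν : Type} (k : α → Int) (d0 : ν) (g : α → ν → ν)
    (l : List α) (d : PySem.Dict Int ν) (p : Int) :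
    (l.foldl (fun pf a => pf.modify (k a) d0 (g a)) d).getD p d0
      = (l.filter (fun a => k a == p)).foldl (fun c a => g a c) (d.getD p d0) := by
  induction l generalizing d with
  | nil => rfl
  | cons x l ih =>
      simp only [List.foldl_cons, List.filter_cons]
      rw [ih, PySem.Dict.getD_modify]
      by_cases h : k x = p
      · simp [h]
      · have hx : (k x == p) = false := by simp [h]
        rw [if_neg (Ne.symm h), hx]
        simp

theorem pv_map_snd_enumerate (b : List Int) (s : Int) :
    (PySem.List.enumerate b s).map (·.2) = b := by
  induction b generalizing s with
  | nil => rfl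
  | cons x xs ih => simp [PySem.List.enumerate_cons, ih]

theorem pv_ofList_snoc {α : Type} [BEq α] (xs : List α) (x : α) :
    PySem.Set.ofList (xs ++ [x]) = (PySem.Set.ofList xs).add x := by
  simp [PySem.Set.ofList_eq_foldl, List.foldl_append]

-- deduplicating after mapping = mapping the deduplicated pairs (first occurrences agree)
theorem pv_ofList_map {α β : Type} [BEq α] [LawfulBEq α] [BEq β] [LawfulBEq β]
    (f : α → β) (s : List α) :
    PySem.Set.ofList ((PySem.Set.ofList s).map f) = PySem.Set.ofList (s.map f) := by
  induction s using List.reverseRecOn with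
  | nil => rfl
  | append_singleton s x ih =>
      rw [pv_ofList_snoc, List.map_append, List.map_singleton, pv_ofList_snoc]
      by_cases hx : x ∈ PySem.Set.ofList s
      · rw [PySem.Set.add_of_mem hx, ih]
        have hfx : f x ∈ PySem.Set.ofList (s.map f) := by
          rw [PySem.Set.mem_ofList]
          exact List.mem_map_of_mem ((PySem.Set.mem_ofList s x).mp hx)
        rw [PySem.Set.add_of_mem hfx]
      · rw [PySem.Set.add_of_not_mem hx, List.map_append, List.map_singleton, pv_ofList_snoc, ih]

-- the snd's of the deduplicated pairs keyed p = deduplicated column p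
theorem pv_column_dedup (p : Int) (s : List (Int × Int)) :
    ((PySem.Set.ofList s).filter (fun q => q.1 == p)).map (·.2)
      = PySem.Set.ofList ((s.filter (fun q => q.1 == p)).map (·.2)) := by
  induction s using List.reverseRecOn with
  | nil => rfl
  | append_singleton s x ih =>
      rw [pv_ofList_snoc]
      by_cases hp : x.1 = p
      · have hfR : (s ++ [x]).filter (fun q => q.1 == p)
            = s.filter (fun q => q.1 == p) ++ [x] := by
          simp [List.filter_append, hp]
        rw [hfR, List.map_append, List.map_singleton, pv_ofList_snoc, ← ih]
        by_cases hx : x ∈ PySem.Set.ofList s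
        · rw [PySem.Set.add_of_mem hx]
          have hx2 : x.2 ∈ ((PySem.Set.ofList s).filter (fun q => q.1 == p)).map (·.2) := by
            refine List.mem_map_of_mem ?_
            rw [List.mem_filter]
            exact ⟨hx, by simp [hp]⟩
          rw [PySem.Set.add_of_mem hx2]
        · rw [PySem.Set.add_of_not_mem hx]
          have hfL : ((PySem.Set.ofList s : List (Int × Int)) ++ [x]).filter (fun q => q.1 == p)
              = (PySem.Set.ofList s).filter (fun q => q.1 == p) ++ [x] := by
            simp [List.filter_append, hp]
          rw [hfL, List.map_append, List.map_singleton]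
          have hx2 : x.2 ∉ ((PySem.Set.ofList s).filter (fun q => q.1 == p)).map (·.2) := by
            intro hmem
            obtain ⟨q, hq, hq2⟩ := List.mem_map.mp hmem
            rw [List.mem_filter] at hq
            have hq1 : q.1 = p := by simpa using hq.2
            have hqx : q = x := by
              apply Prod.ext <;> simp [hq1, hq2, hp]
            exact hx (hqx ▸ hq.1)
          rw [PySem.Set.add_of_not_mem hx2]
      · have hfR : (s ++ [x]).filter (fun q => q.1 == p) = s.filter (fun q => q.1 == p) := by
          simp [List.filter_append, hp]
        rw [hfR, ← ih]
        by_cases hx : x ∈ PySem.Set.ofList s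
        · rw [PySem.Set.add_of_mem hx]
        · rw [PySem.Set.add_of_not_mem hx]
          have hfL : ((PySem.Set.ofList s : List (Int × Int)) ++ [x]).filter (fun q => q.1 == p)
              = (PySem.Set.ofList s).filter (fun q => q.1 == p) := by
            simp [List.filter_append, hp]
          rw [hfL]

-- summing the stream-counts of the distinct pairs whose snd is b = count of b among all snds
-- the two lawful BEq instances on pairs coincide (bridges Mathlib's DecidableEq-derived count)
theorem pv_beq_inst_eq : (instBEqOfDecidableEq : BEq (Int × Int)) = instBEqProd := by
  have hmk : ∀ (i j : BEq (Int × Int)), i.beq = j.beq → i = j := by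
    intro ⟨f⟩ ⟨g⟩ h
    cases h
    rfl
  apply hmk
  funext a b
  by_cases h : a = b
  · subst h; simp
  · have h1 : (a == b) = false := by simpa using h
    have h2 : (@BEq.beq _ instBEqOfDecidableEq a b) = false := by
      simpa [instBEqOfDecidableEq] using h
    rw [h1, h2]

-- summing the stream-counts of the distinct pairs whose snd is b = count of b among all snds
theorem pv_sum_counts (s : List (Int × Int)) (b : Int) :
    (((PySem.Set.ofList s).filter (fun q => q.2 == b)).map (fun q => s.count q)).sum
      = (s.map (·.2)).count b := by
  have hperm : (PySem.Set.ofList s).Perm s.dedup := by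
    rw [List.perm_ext_iff_of_nodup (PySem.Set.nodup_ofList s) s.nodup_dedup]
    intro a
    rw [PySem.Set.mem_ofList, List.mem_dedup]
  have h1 := (hperm.filter (fun q => q.2 == b)).map (fun q => s.count q)
  rw [h1.sum_eq]
  have h2 := List.sum_map_count_dedup_filter_eq_countP (fun q : Int × Int => q.2 == b) s
  rw [pv_beq_inst_eq] at h2
  rw [h2, List.count_eq_countP, List.countP_map]
  rfl

-- count of b in column p = count of the pair (p, b) in the stream
theorem pv_count_column (s : List (Int × Int)) (p b : Int) :
    ((s.filter (fun q => q.1 == p)).map (·.2)).count b = s.count (p, b) := by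
  rw [List.count, List.countP_map, List.countP_filter, List.count]
  apply List.countP_congr
  intro q _
  cases q with
  | mk q1 q2 => simp [Prod.ext_iff, and_comm]

-- a key list drawn from {0..5} does not extend the fixed key set
theorem pv_update_keys (ks : List Int) (h : ∀ x ∈ ks, x ∈ ([0,1,2,3,4,5] : List Int)) :
    PySem.Set.update ([0,1,2,3,4,5] : List Int) ks = ([0,1,2,3,4,5] : List Int) := by
  rw [PySem.Set.update_eq_append_filter]
  have : (PySem.Set.ofList ks).filter
      (fun y => !(PySem.Set.contains ([0,1,2,3,4,5] : List Int) y)) = [] := by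
    apply List.filter_eq_nil_iff.mpr
    intro y hy
    have := h y ((PySem.Set.mem_ofList ks y).mp hy)
    simp [PySem.Set.contains] at this ⊢
    omega
  rw [this, List.append_nil]

theorem pv_main (data : List (List (String × List Int))) (n : Int)
    (hpre : ∀ r ∈ PySem.List.slice data (some (-n)) none,
      (PySem.Dict.mk r).contains "balls" = true ∧
        ((PySem.Dict.mk r).getD "balls" []).length ≤ 6) :
    get_recent_stats data n = get_recent_stats_alt data n := by
  unfold get_recent_stats get_recent_stats_alt
  dsimp only
  rw [PySem.List.foldl_prod_mk
      (f := fun pf (pb : (Int × Int) × Int) =>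
        PySem.Dict.modify pf pb.1.1 PySem.Dict.empty (fun c => c.insert pb.1.2 pb.2))
      (g := fun af (pb : (Int × Int) × Int) => PySem.Dict.modify af pb.1.2 0 (· + pb.2))]
  set recent := PySem.List.slice data (some (-n)) none with hrec
  set bsOf : List (String × List Int) → List Int := fun r => (PySem.Dict.mk r).getD "balls" [] with hbsOf
  set s := recent.flatMap (fun r => PySem.List.enumerate (bsOf r) 0) with hs
  -- every pair of the stream has 0 ≤ fst < 6, snd drawn from a row
  have hmem : ∀ q ∈ s, q.1 ∈ ([0,1,2,3,4,5] : List Int) := by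
    intro q hq
    rw [hs] at hq
    obtain ⟨r, hr, hq2⟩ := List.mem_flatMap.mp hq
    obtain ⟨k, hk, rfl⟩ := (PySem.List.mem_enumerate_iff _ 0 q).mp hq2
    have h6 : (bsOf r).length ≤ 6 := (hpre r hr).2
    simp only [List.mem_cons, List.not_mem_nil]
    omega
  set L := PySem.Set.ofList s with hL
  set pf0 : PySem.Dict Int (PySem.Dict Int Int) :=
    PySem.Dict.ofList ((PySem.List.pyRange 0 6 1).map (fun pos => (pos, PySem.Dict.empty))) with hpf0
  have hpf0keys : pf0.keys = ([0,1,2,3,4,5] : List Int) := rfl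
  have hpf0getD : ∀ p ∈ ([0,1,2,3,4,5] : List Int), pf0.getD p PySem.Dict.empty = PySem.Dict.empty := by
    intro p hp
    simp only [List.mem_cons, List.not_mem_nil, or_false] at hp
    rcases hp with rfl | rfl | rfl | rfl | rfl | rfl <;> rfl
  -- ==== A's two accumulators as single folds over the stream ====
  have hA1 : recent.foldl
      (fun pf r => (PySem.List.enumerate (bsOf r) 0).foldl
        (fun pf pb => pf.modify pb.1 PySem.Dict.empty (fun c => c.modify pb.2 0 (· + 1))) pf) pf0
      = s.foldl (fun pf pb => pf.modify pb.1 PySem.Dict.empty (fun c => c.modify pb.2 0 (· + 1))) pf0 := by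
    rw [hs, pv_foldl_flatMap]
  have hA2 : recent.foldl (fun af r => (bsOf r).foldl (fun af ball => af.modify ball 0 (· + 1)) af)
      (PySem.Dict.empty : PySem.Dict Int Int)
      = PySem.Dict.counter (s.map (·.2)) := by
    rw [PySem.Dict.counter_eq_foldl, hs, List.map_flatMap]
    rw [pv_foldl_flatMap]
    apply PySem.List.foldl_congr_mem
    intro acc r _
    rw [pv_map_snd_enumerate]
  -- ==== B's pair counter ====
  have hPitems : (PySem.Dict.counter s).items = L.map (fun q => (q, (s.count q : Int))) :=
    PySem.Dict.items_counter s
  -- ==== the per-position tables agree ====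
  set APos := s.foldl (fun pf pb => pf.modify pb.1 PySem.Dict.empty (fun c => c.modify pb.2 0 (· + 1))) pf0 with hAPos
  set BPos := (PySem.Dict.counter s).items.foldl
      (fun pf pb => pf.modify pb.1.1 PySem.Dict.empty (fun c => c.insert pb.1.2 pb.2)) pf0 with hBPos
  have hAkeys : APos.keys = ([0,1,2,3,4,5] : List Int) := by
    rw [hAPos, PySem.Dict.keys_foldl_modify_key s (fun pb => pb.1) PySem.Dict.empty
      (fun _ pb c => c.modify pb.2 0 (· + 1)) pf0, hpf0keys]
    exact pv_update_keys _ (by intro x hx; obtain ⟨q, hq, rfl⟩ := List.mem_map.mp hx; exact hmem q hq)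
  have hBkeys : BPos.keys = ([0,1,2,3,4,5] : List Int) := by
    rw [hBPos, PySem.Dict.keys_foldl_modify_key (PySem.Dict.counter s).items
      (fun pb : (Int × Int) × Int => pb.1.1) PySem.Dict.empty
      (fun _ (pb : (Int × Int) × Int) c => c.insert pb.1.2 pb.2) pf0, hpf0keys]
    apply pv_update_keys
    intro x hx
    obtain ⟨pb, hpb, rfl⟩ := List.mem_map.mp hx
    rw [hPitems] at hpb
    obtain ⟨q, hq, rfl⟩ := List.mem_map.mp hpb
    exact hmem q ((PySem.Set.mem_ofList s q).mp (hL ▸ hq))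
  have hgetD : ∀ p ∈ ([0,1,2,3,4,5] : List Int),
      APos.getD p PySem.Dict.empty = BPos.getD p PySem.Dict.empty := by
    intro p hp
    -- A's slot p is the counter of column p
    have hAp : APos.getD p PySem.Dict.empty
        = PySem.Dict.counter ((s.filter (fun q => q.1 == p)).map (·.2)) := by
      rw [hAPos, pv_getD_foldl_modify_key (fun pb : Int × Int => pb.1) PySem.Dict.empty
        (fun pb c => c.modify pb.2 0 (· + 1)) s pf0 p, hpf0getD p hp,
        PySem.Dict.counter_eq_foldl, List.foldl_map]
    -- B's slot p: fold of fresh inserts over the distinct pairs keyed p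
    have hBfold : BPos.getD p PySem.Dict.empty
        = (L.filter (fun q => q.1 == p)).foldl
            (fun c q => c.insert q.2 (s.count q : Int)) PySem.Dict.empty := by
      rw [hBPos, pv_getD_foldl_modify_key (fun pb : (Int × Int) × Int => pb.1.1) PySem.Dict.empty
        (fun pb c => c.insert pb.1.2 pb.2) _ pf0 p, hpf0getD p hp, hPitems,
        List.filter_map, List.foldl_map]
      rfl
    have hnodupcol : ((L.filter (fun q => q.1 == p)).map (·.2)).Nodup := by
      rw [hL, pv_column_dedup]
      exact PySem.Set.nodup_ofList _
    have hBitems : (BPos.getD p PySem.Dict.empty).items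
        = (L.filter (fun q => q.1 == p)).map (fun q => (q.2, (s.count q : Int))) := by
      rw [hBfold]
      have := PySem.Dict.items_foldl_insert_fresh (L.filter (fun q => q.1 == p))
        (fun q => q.2) (fun q => (s.count q : Int)) PySem.Dict.empty
        (by intro a _; rfl) hnodupcol
      simpa using this
    rw [hAp]
    apply Eq.symm
    apply PySem.Dict.ext
    rw [hBitems, PySem.Dict.items_counter, ← pv_column_dedup, ← hL]
    rw [List.map_map]
    apply List.map_congr_left
    intro q hq
    rw [List.mem_filter] at hq
    have hq1 : q.1 = p := by simpa using hq.2
    have hpair : ((p : Int), q.2) = q := by rw [← hq1]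
    simp only [Function.comp]
    rw [pv_count_column, hpair]
  have hPos : APos = BPos := by
    apply PySem.Dict.ext
    rw [PySem.Dict.items_eq_map_keys APos (by rw [hAkeys]; decide) PySem.Dict.empty,
        PySem.Dict.items_eq_map_keys BPos (by rw [hBkeys]; decide) PySem.Dict.empty,
        hAkeys, hBkeys]
    apply List.map_congr_left
    intro p hp
    rw [hgetD p hp]
  -- ==== the overall tables agree ====
  set BAll := (PySem.Dict.counter s).items.foldl
      (fun af pb => af.modify pb.1.2 0 (· + pb.2)) (PySem.Dict.empty : PySem.Dict Int Int) with hBAll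
  have hAllKeys : BAll.keys = (PySem.Dict.counter (s.map (·.2))).keys := by
    rw [hBAll, PySem.Dict.keys_foldl_modify_key (PySem.Dict.counter s).items
      (fun pb : (Int × Int) × Int => pb.1.2) (0 : Int)
      (fun _ (pb : (Int × Int) × Int) x => x + pb.2) PySem.Dict.empty,
      PySem.Dict.keys_counter, hPitems]
    have h1 : (L.map (fun q => (q, (s.count q : Int)))).map (fun pb => pb.1.2) = L.map (·.2) := by
      rw [List.map_map]; rfl
    have h2 : PySem.Set.update (PySem.Dict.empty : PySem.Dict Int Int).keys (L.map (·.2))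
        = PySem.Set.ofList (L.map (·.2)) := by
      rw [PySem.Set.update_eq_append_filter]
      simp [PySem.Set.contains, PySem.Dict.empty, PySem.Dict.keys]
    rw [h1, h2, hL, pv_ofList_map]
  have hAllgetD : ∀ b : Int, BAll.getD b 0 = (PySem.Dict.counter (s.map (·.2))).getD b 0 := by
    intro b
    rw [PySem.Dict.getD_counter]
    rw [hBAll, pv_getD_foldl_modify_key (fun pb : (Int × Int) × Int => pb.1.2) 0
      (fun pb x => x + pb.2) _ PySem.Dict.empty b]
    rw [PySem.Dict.getD_empty]
    rw [hPitems, List.filter_map, List.foldl_map]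
    rw [PySem.List.foldl_add _ (fun q : Int × Int => (s.count q : Int))]
    have hcast : (List.map (fun q : Int × Int => (s.count q : Int))
        (L.filter (fun q => q.2 == b))).sum
        = (((L.filter (fun q => q.2 == b)).map (fun q => s.count q)).sum : Int) := by
      rw [Nat.cast_list_sum, List.map_map]
      rfl
    simp only [Function.comp_def]
    rw [hcast, hL, pv_sum_counts]
    simp
  have hBAllnodup : BAll.keys.Nodup := by
    rw [hBAll]
    exact PySem.Dict.nodup_keys_foldl_modify_key (PySem.Dict.counter s).items
      (fun pb : (Int × Int) × Int => pb.1.2) (0 : Int)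
      (fun _ (pb : (Int × Int) × Int) x => x + pb.2) PySem.Dict.empty
      (by simp [PySem.Dict.empty, PySem.Dict.keys])
  have hAll : PySem.Dict.counter (s.map (·.2)) = BAll := by
    apply PySem.Dict.ext
    rw [PySem.Dict.items_eq_map_keys _ (PySem.Dict.nodup_keys_counter _) 0,
        PySem.Dict.items_eq_map_keys BAll hBAllnodup 0, hAllKeys]
    apply List.map_congr_left
    intro b _
    rw [hAllgetD b]
  rw [hA1, hA2, hAll, hPos]

-- ===== VERDICT (by name: the statement is the Claim_ definition above) =====
theorem get_recent_stats_spec : Claim_equal_get_recent_stats := by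
  intro data n _ hpre
  unfold Spec_get_recent_stats
  exact pv_main data n hpre
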